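-- pv_equiv track=rewrite | github.com/nishant-kumar109/codility-solutions-python | CountDistinctSlices.py | solution
-- ===== SOURCE A (Python) =====
-- def solution(M, A):
--     # write your code in Python 3.6
--     total_slice = 0
--     in_current_slice = [False]*(M+1)
--     head = 0
--     for tail in range(0, len(A)):
--         while head<len(A) and (not in_current_slice[A[head]]):
--             in_current_slice[A[head]] = True
--             total_slice += (head-tail) + 1
--             head +=1
--             total_slice = 1000000000 if total_slice > 1000000000 else total_slice
--         in_current_slice[A[tail]] = False
--     return total_slice
-- ===== SOURCE B (Python) =====
-- def solution(M, A):
--     # Single pass over the right endpoint: keep the left boundary of the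
--     # longest distinct window ending at j via a last-seen-index table.
--     total = 0
--     left = 0
--     last_seen = [-1] * (M + 1)
--     for j in range(len(A)):
--         seen = last_seen[A[j]]
--         if seen + 1 > left:
--             left = seen + 1
--         total += j - left + 1
--         if total > 1000000000:
--             total = 1000000000
--         last_seen[A[j]] = j
--     return total
-- ===== Notes on version B (the rewrite author's own statement) =====
-- stated objective: alternative
-- what changed: Replaces A's tail-outer loop with an inner head-advancing while over a boolean membership array by a single loop over the right endpoint that maintains the window's left boundary via a last-seen-index table, summing j-left+1 per step.
import Mathlib
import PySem

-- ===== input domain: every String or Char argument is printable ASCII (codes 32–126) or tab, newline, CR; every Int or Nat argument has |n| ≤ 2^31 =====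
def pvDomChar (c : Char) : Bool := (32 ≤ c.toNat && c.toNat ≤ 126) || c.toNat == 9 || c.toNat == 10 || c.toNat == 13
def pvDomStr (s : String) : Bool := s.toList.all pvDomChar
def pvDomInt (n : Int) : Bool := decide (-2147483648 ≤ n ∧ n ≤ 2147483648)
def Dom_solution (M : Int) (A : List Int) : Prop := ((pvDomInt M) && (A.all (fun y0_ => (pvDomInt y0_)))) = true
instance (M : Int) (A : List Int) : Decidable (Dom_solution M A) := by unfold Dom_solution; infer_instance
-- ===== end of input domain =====

-- B replaces A's tail-outer/head-advance boolean-membership window by a single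
-- pass over the right endpoint keeping a left boundary and a last-seen-index
-- table (objective: alternative decomposition, same O(n) cost).

-- ===== PORT A =====
-- inner 'while head<len(A) and (not in_current_slice[A[head]])' loop; fuel = len(A) suffices
def solutionLoop (A : List Int) (tail : Int) : Nat → Int × List Bool × Int → Int × List Bool × Int
  | 0, s => s
  | fuel+1, (total_slice, cur, head) =>
    if head < (A.length : Int) ∧ PySem.List.pyGetD cur (PySem.List.pyGetD A head 0) false = false then
      solutionLoop A tail fuel
        (let t' := total_slice + ((head - tail) + 1)
         (if t' > 1000000000 then 1000000000 else t',
          PySem.List.pySetD cur (PySem.List.pyGetD A head 0) true,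
          head + 1))
    else (total_slice, cur, head)

def solution (M : Int) (A : List Int) : Int :=
  ((PySem.List.pyRange 0 (A.length : Int) 1).foldl
    (fun s tail =>
      let s' := solutionLoop A tail A.length s
      (s'.1, PySem.List.pySetD s'.2.1 (PySem.List.pyGetD A tail 0) false, s'.2.2))
    (0, List.replicate (M + 1).toNat false, 0)).1

-- ===== PORT B =====
def solution_alt (M : Int) (A : List Int) : Int :=
  ((PySem.List.pyRange 0 (A.length : Int) 1).foldl
    (fun (s : Int × Int × List Int) j =>
      let seen := PySem.List.pyGetD s.2.2 (PySem.List.pyGetD A j 0) 0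
      let left := if seen + 1 > s.2.1 then seen + 1 else s.2.1
      let t' := s.1 + (j - left + 1)
      (if t' > 1000000000 then 1000000000 else t',
       left,
       PySem.List.pySetD s.2.2 (PySem.List.pyGetD A j 0) j))
    (0, 0, List.replicate (M + 1).toNat (-1 : Int))).1

-- ===== PRECONDITION & SPEC =====
-- Pre_ excludes exactly the inputs where A raises IndexError: any element outside
-- the Python-indexable range [-(M+1), M] of the length-(M+1) marker list.
def Pre_solution (M : Int) (A : List Int) : Prop := ∀ v ∈ A, -(M+1) ≤ v ∧ v ≤ M
instance (M : Int) (A : List Int) : Decidable (Pre_solution M A) := by unfold Pre_solution; infer_instance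
def pvWitness_solution : Int × List Int := (3, [0, 1, 2, 3, -1, 2])
def Spec_solution (M : Int) (A : List Int) (out : Int) : Prop := out = solution_alt M A
instance (M : Int) (A : List Int) (out : Int) : Decidable (Spec_solution M A out) := by unfold Spec_solution; infer_instance

-- ===== CLAIM (what is proved, stated in full; the proofs are below) =====
def Claim_equal_solution : Prop := ∀ (M : Int) (A : List Int), Dom_solution M A → Pre_solution M A → Spec_solution M A (solution M A)

-- ===== LEMMAS AND PROOFS =====

-- index a value v hits in a Python list of length (M+1): negative v wraps
def keyN (M v : Int) : Nat := (if v < 0 then v + (M + 1) else v).toNat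
-- key of position i of A
def kf (M : Int) (A : List Int) (i : Nat) : Nat := keyN M (A.getD i 0)
-- last position < j carrying key x
def lastS (M : Int) (A : List Int) : Nat → Nat → Option Nat
  | 0, _ => none
  | j+1, x => if kf M A j = x then some j else lastS M A j x
-- left boundary of the longest distinct window ending strictly before j
def Lf (M : Int) (A : List Int) : Nat → Nat
  | 0 => 0
  | j+1 => max (Lf M A j) ((lastS M A j (kf M A j)).elim 0 (· + 1))
-- capped addition
def capAdd (t a : Int) : Int := if t + a > 1000000000 then 1000000000 else t + a
-- capped total after the first j right endpoints
def Tot (M : Int) (A : List Int) : Nat → Int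
  | 0 => 0
  | j+1 => capAdd (Tot M A j) ((j : Int) - (Lf M A (j+1) : Int) + 1)
-- some position in [t, h) carries key x
def occ (M : Int) (A : List Int) (t h x : Nat) : Bool :=
  (List.range h).any (fun i => decide (t ≤ i) && decide (kf M A i = x))
-- A's boolean marker array for window [t, h)
def curS (M : Int) (A : List Int) (t h : Nat) : List Bool :=
  (List.range (M + 1).toNat).map (occ M A t h)
-- B's last-seen array after the first j elements
def lsS (M : Int) (A : List Int) (j : Nat) : List Int :=
  (List.range (M + 1).toNat).map (fun x => (lastS M A j x).elim (-1) (fun i => (i : Int)))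
-- keys pairwise distinct on [l, e)
def distinctW (M : Int) (A : List Int) (l e : Nat) : Prop :=
  ∀ i1 i2, l ≤ i1 → i1 < i2 → i2 < e → kf M A i1 ≠ kf M A i2

theorem keyN_lt (M v : Int) (hM : 0 ≤ M) (_h1 : -(M+1) ≤ v) (h2 : v ≤ M) :
    keyN M v < (M + 1).toNat := by
  unfold keyN; split <;> omega

theorem pyGetD_wrap {α : Type} (M v : Int) (xs : List α) (d : α)
    (hlen : xs.length = (M + 1).toNat) (h1 : -(M+1) ≤ v) (h2 : v ≤ M) :
    PySem.List.pyGetD xs v d = xs.getD (keyN M v) d := by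
  have hM : 0 ≤ M := by omega
  simp only [PySem.List.pyGetD, PySem.List.pyGet?, PySem.List.pyIdx?, keyN, hlen]
  by_cases hv : 0 ≤ v
  · rw [if_pos hv, if_pos (by omega), if_neg (by omega)]
    simp [List.getD_eq_getElem?_getD]
  · rw [if_neg (by omega), if_pos (by omega), if_pos (by omega)]
    simp only [Option.bind_some, List.getD_eq_getElem?_getD]
    congr 2
    omega

theorem pySetD_wrap {α : Type} (M v : Int) (xs : List α) (b : α)
    (hlen : xs.length = (M + 1).toNat) (h1 : -(M+1) ≤ v) (h2 : v ≤ M) :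
    PySem.List.pySetD xs v b = xs.set (keyN M v) b := by
  have hM : 0 ≤ M := by omega
  simp only [PySem.List.pySetD, PySem.List.pySet?, PySem.List.pyIdx?, keyN, hlen]
  by_cases hv : 0 ≤ v
  · rw [if_pos hv, if_pos (by omega), if_neg (by omega)]
    simp
  · rw [if_neg (by omega), if_pos (by omega), if_pos (by omega)]
    simp only [Option.map_some, Option.getD_some]
    congr 1
    omega

theorem getD_map_range' {α : Type} (f : Nat → α) (n k : Nat) (d : α) (hk : k < n) :
    ((List.range n).map f).getD k d = f k := by
  rw [List.getD_eq_getElem?_getD]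
  simp [hk]

theorem set_map_range {α : Type} (f : Nat → α) (n k : Nat) (v : α) :
    ((List.range n).map f).set k v = (List.range n).map (fun x => if x = k then v else f x) := by
  apply List.ext_getElem
  · simp
  · intro i h1 h2
    simp only [List.getElem_set, List.getElem_map, List.getElem_range]
    have hi : i < n := by simpa using h2
    by_cases hik : k = i
    · subst hik; simp
    · have h2 : ¬ i = k := fun h => hik h.symm
      simp [hik, h2]

theorem map_range_congr {α : Type} (f g : Nat → α) (n : Nat)
    (h : ∀ x, x < n → f x = g x) : (List.range n).map f = (List.range n).map g := by
  apply List.map_congr_left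
  intro x hx
  exact h x (List.mem_range.mp hx)

-- lastS spec
theorem lastS_some (M : Int) (A : List Int) (j x i : Nat) (h : lastS M A j x = some i) :
    i < j ∧ kf M A i = x ∧ ∀ i', i < i' → i' < j → kf M A i' ≠ x := by
  induction j with
  | zero => simp [lastS] at h
  | succ j ih =>
    simp only [lastS] at h
    split at h
    · rename_i hkj
      obtain rfl : j = i := by simpa using h
      exact ⟨by omega, hkj, by omega⟩
    · rename_i hkj
      obtain ⟨h1, h2, h3⟩ := ih h
      refine ⟨by omega, h2, ?_⟩
      intro i' hi1 hi2
      rcases Nat.lt_or_ge i' j with hlt | hge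
      · exact h3 i' hi1 hlt
      · obtain rfl : i' = j := by omega
        exact hkj

theorem lastS_none (M : Int) (A : List Int) (j x : Nat) (h : lastS M A j x = none) :
    ∀ i, i < j → kf M A i ≠ x := by
  induction j with
  | zero => intro i hi; omega
  | succ j ih =>
    simp only [lastS] at h
    split at h
    · simp at h
    · rename_i hkj
      intro i hi
      rcases Nat.lt_or_ge i j with hlt | hge
      · exact ih h i hlt
      · obtain rfl : i = j := by omega
        exact hkj

theorem occ_iff (M : Int) (A : List Int) (t h x : Nat) :
    occ M A t h x = true ↔ ∃ i, t ≤ i ∧ i < h ∧ kf M A i = x := by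
  simp [occ, List.any_eq_true, List.mem_range]
  tauto

-- characterisation of the left boundary
theorem Lf_char (M : Int) (A : List Int) (e : Nat) :
    ∀ l, distinctW M A l e ↔ Lf M A e ≤ l := by
  induction e with
  | zero =>
    intro l
    constructor
    · intro _; simp [Lf]
    · intro _ i1 i2 _ _ h3; omega
  | succ j ih =>
    intro l
    have hsplit : distinctW M A l (j+1) ↔ distinctW M A l j ∧ ∀ i, l ≤ i → i < j → kf M A i ≠ kf M A j := by
      constructor
      · intro hd
        refine ⟨fun i1 i2 a b c => hd i1 i2 a b (by omega), fun i hi1 hi2 => hd i j hi1 hi2 (by omega)⟩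
      · rintro ⟨hd, hnew⟩ i1 i2 a b c
        rcases Nat.lt_or_ge i2 j with hlt | hge
        · exact hd i1 i2 a b hlt
        · obtain rfl : i2 = j := by omega
          exact hnew i1 a b
    rw [hsplit, ih]
    have hlast : (∀ i, l ≤ i → i < j → kf M A i ≠ kf M A j) ↔
        ((lastS M A j (kf M A j)).elim 0 (· + 1) ≤ l) := by
      cases hc : lastS M A j (kf M A j) with
      | none =>
        simp only [Option.elim]
        constructor
        · intro _; omega
        · intro _ i _ hi; exact lastS_none M A j _ hc i hi
      | some i =>
        obtain ⟨hij, hki, hmax⟩ := lastS_some M A j _ i hc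
        simp only [Option.elim]
        constructor
        · intro hno
          by_contra hle
          exact hno i (by omega) hij hki
        · intro hle i' hi1 hi2
          exact hmax i' (by omega) hi2
    rw [hlast]
    simp only [Lf]
    omega

theorem distinctW_mono (M : Int) (A : List Int) (l e e' : Nat) (h : e ≤ e')
    (hd : distinctW M A l e') : distinctW M A l e := by
  intro i1 i2 h1 h2 h3; exact hd i1 i2 h1 h2 (by omega)

-- element bounds from Pre_
theorem elem_bounds (M : Int) (A : List Int) (hPre : Pre_solution M A) (i : Nat)
    (hi : i < A.length) : -(M+1) ≤ A.getD i 0 ∧ A.getD i 0 ≤ M ∧ 0 ≤ M := by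
  have hmem : A.getD i 0 ∈ A := by
    rw [List.getD_eq_getElem?_getD, List.getElem?_eq_getElem hi]
    exact List.getElem_mem hi
  obtain ⟨h1, h2⟩ := hPre _ hmem
  exact ⟨h1, h2, by omega⟩

theorem bool_eq_of_iff (b c : Bool) (h : b = true ↔ c = true) : b = c := by
  cases b <;> cases c <;> simp_all

-- ===== the inner while loop =====
theorem loop_lemma (M : Int) (A : List Int) (hPre : Pre_solution M A)
    (fuel t h : Nat) (hfuel : A.length - h ≤ fuel) (hth : t ≤ h) (hhn : h ≤ A.length)
    (hd : distinctW M A t h)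
    (hdup : t = 0 ∨ h = A.length ∨ ¬ distinctW M A (t-1) (h+1)) :
    ∃ e, h ≤ e ∧ e ≤ A.length ∧
      solutionLoop A (t : Int) fuel (Tot M A h, curS M A t h, (h : Int)) =
        (Tot M A e, curS M A t e, (e : Int)) ∧
      distinctW M A t e ∧
      (e = A.length ∨ occ M A t e (kf M A e) = true) ∧
      (t = 0 ∨ e = A.length ∨ ¬ distinctW M A (t-1) (e+1)) := by
  induction fuel generalizing h with
  | zero =>
    have he : h = A.length := by omega
    exact ⟨h, le_refl h, hhn, rfl, hd, Or.inl he, hdup⟩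
  | succ fuel ih =>
    by_cases hn : h < A.length
    · obtain ⟨hb1, hb2, hM⟩ := elem_bounds M A hPre h hn
      have hlen : (curS M A t h).length = (M + 1).toNat := by simp [curS]
      have hget : PySem.List.pyGetD A (h : Int) 0 = A.getD h 0 := by
        simp [PySem.List.pyGetD_natCast]
      have hklt : kf M A h < (M + 1).toNat := keyN_lt M _ hM hb1 hb2
      have hlook : PySem.List.pyGetD (curS M A t h) (PySem.List.pyGetD A (h : Int) 0) false =
          occ M A t h (kf M A h) := by
        rw [hget, pyGetD_wrap M _ _ _ hlen hb1 hb2]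
        simp only [curS]
        exact getD_map_range' _ _ _ _ hklt
      by_cases hocc : occ M A t h (kf M A h) = true
      · -- duplicate found: the while loop stops here
        refine ⟨h, le_refl h, hhn, ?_, hd, Or.inr hocc, hdup⟩
        simp only [solutionLoop]
        rw [if_neg]
        rintro ⟨-, hcond⟩
        rw [hlook, hocc] at hcond
        simp at hcond
      · -- fresh element: advance the head
        have hoccf : occ M A t h (kf M A h) = false := by
          cases hc : occ M A t h (kf M A h) <;> simp_all
        have hd' : distinctW M A t (h+1) := by
          intro i1 i2 hi1 hi2 hi3 hk
          rcases Nat.lt_or_ge i2 h with hlt | hge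
          · exact hd i1 i2 hi1 hi2 hlt hk
          · have hi2h : i2 = h := by omega
            rw [hi2h] at hk
            exact hocc ((occ_iff M A t h (kf M A h)).mpr ⟨i1, hi1, by omega, hk⟩)
        have hLf : Lf M A (h+1) = t := by
          have hle : Lf M A (h+1) ≤ t := (Lf_char M A (h+1) t).mp hd'
          rcases hdup with h0 | hfin | hnd
          · omega
          · omega
          · have := (Lf_char M A (h+1) (t-1)).not.mp
              (fun hc => hnd (distinctW_mono M A (t-1) (h+1) (h+1) (le_refl _) hc))
            omega
        have hcur' : PySem.List.pySetD (curS M A t h) (PySem.List.pyGetD A (h : Int) 0) true =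
            curS M A t (h+1) := by
          rw [hget, pySetD_wrap M _ _ _ hlen hb1 hb2]
          have hkey : keyN M (A.getD h 0) = kf M A h := rfl
          rw [hkey]
          simp only [curS]
          rw [set_map_range]
          apply map_range_congr
          intro x hx
          have hocc1 : occ M A t (h+1) x = (occ M A t h x || (decide (t ≤ h) && decide (kf M A h = x))) := by
            simp [occ, List.range_succ]
          by_cases hxe : x = kf M A h
          · subst hxe
            rw [if_pos rfl, hocc1]
            simp [hth]
          · rw [if_neg hxe, hocc1]
            have : decide (kf M A h = x) = false := by
              simp; exact fun hq => hxe hq.symm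
            simp [this]
        have htot' : (if Tot M A h + (((h : Int) - (t : Int)) + 1) > 1000000000 then (1000000000 : Int)
              else Tot M A h + (((h : Int) - (t : Int)) + 1)) = Tot M A (h+1) := by
          simp only [Tot, capAdd, hLf]
        have hdup' : t = 0 ∨ h + 1 = A.length ∨ ¬ distinctW M A (t-1) (h+1+1) := by
          rcases hdup with h0 | hfin | hnd
          · exact Or.inl h0
          · omega
          · exact Or.inr (Or.inr (fun hc => hnd (distinctW_mono M A (t-1) (h+1) (h+2) (by omega) hc)))
        obtain ⟨e, he1, he2, heq, he3, he4, he5⟩ :=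
          ih (h+1) (by omega) (by omega) (by omega) hd' hdup'
        refine ⟨e, by omega, he2, ?_, he3, he4, he5⟩
        simp only [solutionLoop]
        rw [if_pos ⟨by exact_mod_cast hn, by rw [hlook]; exact hoccf⟩]
        have hcast : ((h : Int) + 1) = ((h + 1 : Nat) : Int) := by push_cast; ring
        rw [← heq]
        simp only [hcur', htot', hcast]
    · have he : h = A.length := by omega
      refine ⟨h, le_refl h, hhn, ?_, hd, Or.inl he, hdup⟩
      simp only [solutionLoop]
      rw [if_neg]
      rintro ⟨hcond, -⟩
      omega

-- ===== the outer loops =====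
theorem outer_A (M : Int) (A : List Int) (hPre : Pre_solution M A) (t : Nat)
    (ht : t ≤ A.length) :
    ∃ h, t ≤ h ∧ h ≤ A.length ∧
      ((List.range t).map (fun k : Nat => (k : Int))).foldl
        (fun s tail =>
          let s' := solutionLoop A tail A.length s
          (s'.1, PySem.List.pySetD s'.2.1 (PySem.List.pyGetD A tail 0) false, s'.2.2))
        (0, List.replicate (M + 1).toNat false, 0) = (Tot M A h, curS M A t h, (h : Int)) ∧
      distinctW M A t h ∧
      (t = 0 ∨ h = A.length ∨ ¬ distinctW M A (t-1) (h+1)) := by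
  induction t with
  | zero =>
    refine ⟨0, le_refl 0, by omega, ?_, fun i1 i2 _ _ h3 => by omega, Or.inl rfl⟩
    simp only [List.range_zero, List.map_nil, List.foldl_nil, Tot]
    refine Prod.ext rfl (Prod.ext ?_ rfl)
    simp only [curS]
    have : ∀ x, x < (M + 1).toNat → occ M A 0 0 x = false := by
      intro x hx; simp [occ]
    calc List.replicate (M + 1).toNat false
        = (List.range (M + 1).toNat).map (fun _ => false) := by simp [List.map_const']
      _ = (List.range (M + 1).toNat).map (occ M A 0 0) := map_range_congr _ _ _ (fun x hx => (this x hx).symm)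
  | succ t iht =>
    have ht' : t < A.length := by omega
    obtain ⟨hb1, hb2, hM⟩ := elem_bounds M A hPre t ht'
    obtain ⟨h, hth, hhn, heq, hd, hdup⟩ := iht (by omega)
    obtain ⟨e, he1, he2, heq2, he3, he4, he5⟩ :=
      loop_lemma M A hPre A.length t h (by omega) hth hhn hd hdup
    rw [List.range_succ, List.map_append, List.foldl_append, heq]
    simp only [List.map_cons, List.map_nil, List.foldl_cons, List.foldl_nil]
    rw [heq2]
    have hte : t < e := by
      rcases Nat.lt_or_ge t e with hlt | hge
      · exact hlt
      · have het : e = t := by omega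
        subst het
        rcases he4 with hfin | hoc
        · omega
        · obtain ⟨i, hi1, hi2, -⟩ := (occ_iff M A e e _).mp hoc
          omega
    have hlen : (curS M A t e).length = (M + 1).toNat := by simp [curS]
    have hget : PySem.List.pyGetD A (t : Int) 0 = A.getD t 0 := by
      simp [PySem.List.pyGetD_natCast]
    have hclear : PySem.List.pySetD (curS M A t e) (PySem.List.pyGetD A (t : Int) 0) false =
        curS M A (t+1) e := by
      rw [hget, pySetD_wrap M _ _ _ hlen hb1 hb2]
      have hkey : keyN M (A.getD t 0) = kf M A t := rfl
      rw [hkey]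
      simp only [curS]
      rw [set_map_range]
      apply map_range_congr
      intro x hx
      apply bool_eq_of_iff
      rw [occ_iff]
      by_cases hxe : x = kf M A t
      · subst hxe
        rw [if_pos rfl]
        constructor
        · intro hc; exact absurd hc (by simp)
        · rintro ⟨i, hi1, hi2, hi3⟩
          exact absurd hi3.symm (he3 t i (le_refl t) (by omega) hi2)
      · rw [if_neg hxe, occ_iff]
        constructor
        · rintro ⟨i, hi1, hi2, hi3⟩
          refine ⟨i, ?_, hi2, hi3⟩
          rcases Nat.lt_or_ge i (t+1) with hlt | hge
          · have : i = t := by omega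
            subst this
            exact absurd hi3.symm hxe
          · omega
        · rintro ⟨i, hi1, hi2, hi3⟩
          exact ⟨i, by omega, hi2, hi3⟩
    refine ⟨e, by omega, he2, ?_, ?_, ?_⟩
    · rw [hclear]
    · intro i1 i2 hi1 hi2 hi3
      exact he3 i1 i2 (by omega) hi2 hi3
    · rcases he4 with hfin | hoc
      · exact Or.inr (Or.inl hfin)
      · refine Or.inr (Or.inr ?_)
        obtain ⟨i, hi1, hi2, hi3⟩ := (occ_iff M A t e _).mp hoc
        intro hc
        exact hc i e (by omega) hi2 (by omega) hi3

theorem outer_B (M : Int) (A : List Int) (hPre : Pre_solution M A) (t : Nat)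
    (ht : t ≤ A.length) :
    ((List.range t).map (fun k : Nat => (k : Int))).foldl
      (fun (s : Int × Int × List Int) j =>
        let seen := PySem.List.pyGetD s.2.2 (PySem.List.pyGetD A j 0) 0
        let left := if seen + 1 > s.2.1 then seen + 1 else s.2.1
        let t' := s.1 + (j - left + 1)
        (if t' > 1000000000 then 1000000000 else t',
         left,
         PySem.List.pySetD s.2.2 (PySem.List.pyGetD A j 0) j))
      (0, 0, List.replicate (M + 1).toNat (-1 : Int)) =
      (Tot M A t, (Lf M A t : Int), lsS M A t) := by
  induction t with
  | zero =>
    simp only [List.range_zero, List.map_nil, List.foldl_nil, Tot, Lf, lsS, lastS]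
    refine Prod.ext rfl (Prod.ext rfl ?_)
    simp [List.map_const']
  | succ t ih =>
    have ht' : t < A.length := by omega
    obtain ⟨hb1, hb2, hM⟩ := elem_bounds M A hPre t ht'
    rw [List.range_succ, List.map_append, List.foldl_append, ih (by omega)]
    simp only [List.map_cons, List.map_nil, List.foldl_cons, List.foldl_nil]
    have hlen : (lsS M A t).length = (M + 1).toNat := by
      simp [lsS]
    have hget : PySem.List.pyGetD A (t : Int) 0 = A.getD t 0 := by
      simp [PySem.List.pyGetD_natCast]
    have hkey : keyN M (A.getD t 0) = kf M A t := rfl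
    have hklt : kf M A t < (M + 1).toNat := keyN_lt M _ hM hb1 hb2
    have hseen : PySem.List.pyGetD (lsS M A t) (PySem.List.pyGetD A (t : Int) 0) 0 =
        (lastS M A t (kf M A t)).elim (-1) (fun i => (i : Int)) := by
      rw [hget, pyGetD_wrap M _ _ _ hlen hb1 hb2, hkey]
      simp only [lsS]
      exact getD_map_range' _ _ _ _ hklt
    have hleft : (if (lastS M A t (kf M A t)).elim (-1) (fun i => (i : Int)) + 1 > (Lf M A t : Int)
          then (lastS M A t (kf M A t)).elim (-1) (fun i => (i : Int)) + 1
          else (Lf M A t : Int)) = (Lf M A (t+1) : Int) := by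
      cases hc : lastS M A t (kf M A t) with
      | none =>
        simp only [Option.elim, Lf, hc]
        rw [if_neg (by push_cast; omega)]
        simp
      | some i =>
        simp only [Option.elim, Lf, hc]
        split <;> rename_i hcmp <;> push_cast <;> omega
    have hset : PySem.List.pySetD (lsS M A t) (PySem.List.pyGetD A (t : Int) 0) (t : Int) =
        lsS M A (t+1) := by
      rw [hget, pySetD_wrap M _ _ _ hlen hb1 hb2, hkey]
      simp only [lsS]
      rw [set_map_range]
      apply map_range_congr
      intro x hx
      simp only [lastS]
      by_cases hxe : x = kf M A t
      · subst hxe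
        simp
      · rw [if_neg hxe, if_neg (fun h : kf M A t = x => hxe h.symm)]
    refine Prod.ext ?_ (Prod.ext ?_ ?_)
    · simp only [hseen, hleft]
      simp only [Tot, capAdd]
    · simp only [hseen, hleft]
    · simp only [hset]

-- ===== VERDICT (by name: the statement is the Claim_ definition above) =====
theorem solution_spec : Claim_equal_solution := by
  intro M A _hDom hPre
  unfold Spec_solution
  show solution M A = solution_alt M A
  unfold solution solution_alt
  rw [PySem.List.pyRange_zero_natCast]
  obtain ⟨h, hth, hhn, heq, -, -⟩ := outer_A M A hPre A.length (le_refl _)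
  have hh : h = A.length := by omega
  rw [heq, outer_B M A hPre A.length (le_refl _), hh]
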